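-- pv_equiv track=rewrite | github.com/igfox/contextual_motifs | lib/glucose_processing.py | hypo_event_num
-- ===== SOURCE A (Python) =====
-- HYPO=70
--
-- def hypo_event_num(arr):
--     '''
--     Returns number of hypoglycemic events in an array
--     '''
--     hypo = 0
--     ht = 0
--     max_ht = 0
--     for i in arr:
--         if i <HYPO:
--             ht += 1
--         else:
--             ht = 0
--         if ht == 4:
--             hypo += 1
--         if ht > max_ht:
--             max_ht = ht
--     return hypo
-- ===== SOURCE B (Python) =====
-- from itertools import groupby
--
-- HYPO = 70
--
-- def hypo_event_num(arr):
--     '''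
--     Returns number of hypoglycemic events in an array
--     '''
--     count = 0
--     for below, group in groupby(arr, key=lambda x: x < HYPO):
--         if below and sum(1 for _ in group) >= 4:
--             count += 1
--     return count
-- ===== Notes on version B (the rewrite author's own statement) =====
-- stated objective: simpler
-- what changed: Replaces the running counter with exact ==4 transition detection (and dead max_ht tracking) by partitioning the array into consecutive runs via itertools.groupby and counting below-threshold runs of length >= 4.
import Mathlib
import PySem

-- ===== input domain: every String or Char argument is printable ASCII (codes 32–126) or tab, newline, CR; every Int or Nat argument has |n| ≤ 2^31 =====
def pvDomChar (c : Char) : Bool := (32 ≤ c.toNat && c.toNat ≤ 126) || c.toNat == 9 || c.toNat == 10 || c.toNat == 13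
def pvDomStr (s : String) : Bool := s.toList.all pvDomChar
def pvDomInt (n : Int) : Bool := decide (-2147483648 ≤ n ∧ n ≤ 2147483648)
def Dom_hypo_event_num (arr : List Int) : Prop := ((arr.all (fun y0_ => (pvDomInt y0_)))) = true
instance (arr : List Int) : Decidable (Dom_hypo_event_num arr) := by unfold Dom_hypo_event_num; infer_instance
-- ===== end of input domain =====

-- B replaces A's running counter (with its exact-==4 event detection and dead max_ht
-- tracking) by partitioning the list into consecutive runs and counting below-70 runs
-- of length >= 4; objective: simpler.

-- ===== PORT A =====
-- A's loop body over the state (hypo, ht, max_ht)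
def hypoStep (st : Int × Int × Int) (i : Int) : Int × Int × Int :=
  let hypo := st.1
  let ht := st.2.1
  let max_ht := st.2.2
  let ht := if i < 70 then ht + 1 else (0 : Int)
  let hypo := if ht == 4 then hypo + 1 else hypo
  let max_ht := if ht > max_ht then ht else max_ht
  (hypo, ht, max_ht)

def hypo_event_num (arr : List Int) : Int :=
  (arr.foldl hypoStep (0, 0, 0)).1

-- ===== PORT B =====
-- B groups consecutive elements by the predicate (x < 70) (itertools.groupby) and adds 1
-- for each below-threshold run of length >= 4; transcribed as recursion on the runs,
-- with takeWhile/dropWhile producing the current group and the rest.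
def hypo_event_num_altGo : List Int → Int
  | [] => 0
  | x :: xs =>
    if x < 70 then
      (if 4 ≤ ((x :: xs).takeWhile (fun y => y < 70)).length then 1 else 0)
        + hypo_event_num_altGo ((x :: xs).dropWhile (fun y => y < 70))
    else
      hypo_event_num_altGo xs
termination_by l => l.length
decreasing_by
  all_goals simp_all
  exact List.length_dropWhile_le _ _

def hypo_event_num_alt (arr : List Int) : Int := hypo_event_num_altGo arr

-- ===== PRECONDITION & SPEC =====
def Spec_hypo_event_num (arr : List Int) (out : Int) : Prop := out = hypo_event_num_alt arr
instance (arr : List Int) (out : Int) : Decidable (Spec_hypo_event_num arr out) := by unfold Spec_hypo_event_num; infer_instance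

-- ===== CLAIM (what is proved, stated in full; the proofs are below) =====
def Claim_equal_hypo_event_num : Prop := ∀ (arr : List Int), Dom_hypo_event_num arr → Spec_hypo_event_num arr (hypo_event_num arr)

-- ===== LEMMAS AND PROOFS =====

-- events A still counts, given the remaining list and the current run length t
def aGo : List Int → Int → Int
  | [], _ => 0
  | x :: xs, t =>
    if x < 70 then (if t + 1 == 4 then 1 else 0) + aGo xs (t + 1)
    else aGo xs 0

theorem hypo_foldl_eq_aGo (arr : List Int) :
    ∀ st : Int × Int × Int, (arr.foldl hypoStep st).1 = st.1 + aGo arr st.2.1 := by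
  induction arr with
  | nil => intro st; simp [aGo]
  | cons x xs ih =>
    intro st
    rw [List.foldl_cons, ih]
    by_cases hx : x < 70
    · by_cases h4 : st.2.1 + 1 = (4 : Int)
      · simp [hypoStep, aGo, hx, h4]; ring
      · have h4' : (st.2.1 + 1 == (4 : Int)) = false := by simp [h4]
        simp [hypoStep, aGo, hx, h4']
    · simp [hypoStep, aGo, hx]

-- once the run length is ≥ 4, no further event fires until the run ends
theorem aGo_ge_four (xs : List Int) :
    ∀ t : Int, 4 ≤ t → aGo xs t = aGo (xs.dropWhile (fun y => y < 70)) 0 := by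
  induction xs with
  | nil => intro t _; simp [aGo, List.dropWhile]
  | cons x xs ih =>
    intro t ht
    by_cases hx : x < 70
    · have h4 : (t + 1 == (4 : Int)) = false := by simp; omega
      simp [aGo, hx, h4, ih (t + 1) (by omega)]
    · simp [aGo, hx]

-- the run-splitting characterisation of aGo for 0 ≤ t < 4
theorem aGo_run (xs : List Int) :
    ∀ t : Int, 0 ≤ t → t < 4 →
      aGo xs t =
        (if 4 ≤ t + ((xs.takeWhile (fun y => y < 70)).length : Int) then 1 else 0)
          + aGo (xs.dropWhile (fun y => y < 70)) 0 := by
  induction xs with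
  | nil =>
    intro t _ h
    have : ¬ ((4 : Int) ≤ t + ((([] : List Int).takeWhile (fun y => y < 70)).length : Int)) := by
      simp; omega
    rw [if_neg this]
    simp [aGo, List.dropWhile]
  | cons x xs ih =>
    intro t h0 h4
    by_cases hx : x < 70
    · have htw : (x :: xs).takeWhile (fun y => y < 70)
          = x :: xs.takeWhile (fun y => y < 70) := by simp [hx]
      have hdw : (x :: xs).dropWhile (fun y => y < 70)
          = xs.dropWhile (fun y => y < 70) := by simp [hx]
      rw [show aGo (x :: xs) t = (if t + 1 == 4 then 1 else 0) + aGo xs (t + 1) from by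
            simp [aGo, hx],
          htw, hdw, List.length_cons]
      by_cases he : t + 1 = (4 : Int)
      · have h1 : (t + 1 == (4 : Int)) = true := by simp [he]
        rw [h1, if_pos rfl, he, aGo_ge_four xs 4 (le_refl 4)]
        have hc : (4 : Int) ≤ t + (((xs.takeWhile (fun y => y < 70)).length + 1 : ℕ) : Int) := by
          push_cast; omega
        rw [if_pos hc]
      · have h1 : (t + 1 == (4 : Int)) = false := by simp [he]
        rw [h1, if_neg (by simp), ih (t + 1) (by omega) (by omega), zero_add]
        have hiff : ((4 : Int) ≤ t + 1 + ((xs.takeWhile (fun y => y < 70)).length : Int)) ↔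
            ((4 : Int) ≤ t + (((xs.takeWhile (fun y => y < 70)).length + 1 : ℕ) : Int)) := by
          push_cast; omega
        rw [if_congr hiff rfl rfl]
    · have htw0 : (x :: xs).takeWhile (fun y => y < 70) = [] := by
        simp [hx]
      have hdw0 : (x :: xs).dropWhile (fun y => y < 70) = x :: xs := by
        simp [hx]
      rw [show aGo (x :: xs) t = aGo xs 0 from by simp [aGo, hx],
          htw0, hdw0,
          show aGo (x :: xs) 0 = aGo xs 0 from by simp [aGo, hx]]
      have hno : ¬ ((4 : Int) ≤ t + ((([] : List Int).length : Int))) := by simp; omega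
      rw [if_neg hno, zero_add]

-- B's run recursion computes aGo · 0
theorem altGo_eq_aGo (arr : List Int) : hypo_event_num_altGo arr = aGo arr 0 := by
  induction hn : arr.length using Nat.strong_induction_on generalizing arr with
  | _ n ih =>
    match arr with
    | [] => rw [hypo_event_num_altGo.eq_def]; dsimp only; simp [aGo]
    | x :: xs =>
      by_cases hx : x < 70
      · rw [hypo_event_num_altGo.eq_def]; dsimp only; rw [if_pos hx,
          aGo_run (x :: xs) 0 (by omega) (by omega), zero_add]
        have hlt : ((x :: xs).dropWhile (fun y => y < 70)).length < n := by
          rw [List.dropWhile_cons, if_pos (by simpa using hx)]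
          subst hn
          exact Nat.lt_succ_of_le (List.length_dropWhile_le _ _)
        rw [ih _ hlt _ rfl]
        norm_cast
      · rw [hypo_event_num_altGo.eq_def]; dsimp only; rw [if_neg hx]
        have hlt : xs.length < n := by subst hn; simp
        rw [ih _ hlt _ rfl]
        simp [aGo, hx]

-- ===== VERDICT (by name: the statement is the Claim_ definition above) =====
theorem hypo_event_num_spec : Claim_equal_hypo_event_num := by
  intro arr _
  unfold Spec_hypo_event_num hypo_event_num hypo_event_num_alt
  rw [hypo_foldl_eq_aGo arr (0, 0, 0), altGo_eq_aGo]
  simp
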